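-- pv_equiv track=rewrite | github.com/owendabestone/owensfiles | find_pos.py | find_pos1
-- ===== SOURCE A (Python) =====
-- def find_pos1(string,symbol):
--     # this function returns a list of position values of where the symbol is located
--
--     output = []
--
--     last_position = string.find(symbol)
--
--     output.append(last_position)
--
--
--     while last_position != -1:
--
--         output.append(string.find(symbol,last_position + 1))
--
--         last_position = output[-1]
--
--     output = output[0:-1]
--
--
--     return output
-- ===== SOURCE B (Python) =====
-- def find_pos1(string, symbol):
--     # Idiomatic full-index scan: collect every start index where symbol occurs.
--     # range goes up to len(string)+1 so the empty symbol matches at len(string) too,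
--     # exactly as successive str.find calls report it.
--     return [i for i in range(len(string) + 1) if string.startswith(symbol, i)]
-- ===== Notes on version B (the rewrite author's own statement) =====
-- stated objective: idiomatic
-- what changed: Replaces A's moving-pointer loop of successive str.find calls (appending a trailing -1 and slicing it off) with a single comprehension that tests string.startswith(symbol, i) at every index 0..len(string).
import Mathlib
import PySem

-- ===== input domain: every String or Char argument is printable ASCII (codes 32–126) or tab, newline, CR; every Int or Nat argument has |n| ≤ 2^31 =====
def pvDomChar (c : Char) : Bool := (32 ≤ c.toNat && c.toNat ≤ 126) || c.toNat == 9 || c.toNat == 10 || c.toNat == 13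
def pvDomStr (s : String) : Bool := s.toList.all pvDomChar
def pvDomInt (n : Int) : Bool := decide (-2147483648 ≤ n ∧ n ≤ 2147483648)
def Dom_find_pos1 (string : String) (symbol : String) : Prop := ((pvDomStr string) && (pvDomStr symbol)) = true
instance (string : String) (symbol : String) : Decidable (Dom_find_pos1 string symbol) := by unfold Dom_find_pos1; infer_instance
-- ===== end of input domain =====

-- B replaces A's moving-pointer str.find loop (with trailing -1 trimming) by a direct
-- per-index startswith scan over range(len+1); objective: idiomatic, same cost class.

-- ===== PORT A =====
-- The while loop, with fuel bounding the iteration count (each iteration strictly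
-- advances last_position, so |string|+2 steps suffice; proved in the lemmas below).
def findLoopA (s sym : List Char) (last : Int) : Nat → List Int
  | 0 => []
  | fuel + 1 =>
    if last ≠ -1 then
      -- output.append(string.find(symbol, last_position + 1)); last_position = output[-1]
      let nxt := PySem.Chars.findFrom s sym (last + 1) none
      nxt :: findLoopA s sym nxt fuel
    else []

def find_pos1 (string : String) (symbol : String) : List Int :=
  let s := string.toList
  let sym := symbol.toList
  -- last_position = string.find(symbol); output.append(last_position); while …
  let last_position := PySem.Chars.find s sym
  let output := last_position :: findLoopA s sym last_position (s.length + 2)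
  -- output = output[0:-1]
  PySem.List.slice output (some 0) (some (-1))

-- ===== PORT B =====
-- string.startswith(symbol, i) with 0 ≤ i ≤ len(string) is exactly
-- 'symbol is a prefix of the suffix starting at i'.
def find_pos1_alt (string : String) (symbol : String) : List Int :=
  (PySem.List.pyRange 0 (string.toList.length + 1) 1).filter
    (fun i => PySem.Chars.startswith (string.toList.drop i.toNat) symbol.toList)

-- ===== PRECONDITION & SPEC =====
def Spec_find_pos1 (string : String) (symbol : String) (out : List Int) : Prop := out = find_pos1_alt string symbol
instance (string : String) (symbol : String) (out : List Int) : Decidable (Spec_find_pos1 string symbol out) := by unfold Spec_find_pos1; infer_instance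

-- ===== CLAIM (what is proved, stated in full; the proofs are below) =====
def Claim_equal_find_pos1 : Prop := ∀ (string : String) (symbol : String), Dom_find_pos1 string symbol → Spec_find_pos1 string symbol (find_pos1 string symbol)

-- ===== LEMMAS AND PROOFS =====

-- find with a start index strictly past the end of the string yields -1.
lemma findFrom_past_end (s sym : List Char) :
    PySem.Chars.findFrom s sym ((s.length : Int) + 1) none = -1 := by
  simp only [PySem.Chars.findFrom]
  have h1 : ¬ ((s.length : Int) + 1 < 0) := by omega
  have h2 : (s.length : Int) < (s.length : Int) + 1 := by omega
  simp [h1, h2]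

-- a prefix of a later suffix is an infix of an earlier suffix
lemma prefix_drop_infix (s sym : List Char) {k i : Nat} (hki : k ≤ i)
    (h : sym <+: s.drop i) : sym <:+: s.drop k := by
  have : s.drop i = (s.drop k).drop (i - k) := by
    rw [List.drop_drop]; congr 1; omega
  rw [this] at h
  exact h.isInfix.trans (List.drop_suffix _ _).isInfix

-- Main loop invariant: the find result at start index k followed by the rest of the
-- loop equals the indices ≥ k at which symbol occurs, then the trailing -1.
lemma loop_main (s sym : List Char) :
    ∀ fuel k, k ≤ s.length + 1 → s.length + 1 - k ≤ fuel →
    PySem.Chars.findFrom s sym (k : Int) none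
      :: findLoopA s sym (PySem.Chars.findFrom s sym (k : Int) none) fuel
    = ((List.range' k (s.length + 1 - k)).filter
         (fun i => PySem.Chars.startswith (s.drop i) sym)).map Int.ofNat
      ++ [-1] := by
  intro fuel
  induction fuel with
  | zero =>
    intro k hk hf
    have hk1 : k = s.length + 1 := by omega
    subst hk1
    have : PySem.Chars.findFrom s sym ((s.length : Int) + 1) none = -1 := findFrom_past_end s sym
    simp only [Nat.cast_add, Nat.cast_one] at *
    rw [this]
    simp [findLoopA]
  | succ fuel ih =>
    intro k hk hf
    by_cases hend : k = s.length + 1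
    · subst hend
      have h := findFrom_past_end s sym
      simp only [Nat.cast_add, Nat.cast_one] at *
      rw [h]
      simp [findLoopA]
    · have hkle : k ≤ s.length := by omega
      rw [PySem.Chars.findFrom_natCast s sym k hkle]
      by_cases hneg : PySem.Chars.find (s.drop k) sym = -1
      · simp only [hneg, reduceIte]
        have hnil : (List.range' k (s.length + 1 - k)).filter
            (fun i => PySem.Chars.startswith (s.drop i) sym) = [] := by
          rw [List.filter_eq_nil_iff]
          intro i hi
          rw [List.mem_range'_1] at hi
          simp only [Bool.eq_false_iff, PySem.Chars.startswith_iff]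
          intro hp
          exact ((PySem.Chars.find_eq_neg_one_iff _ _).mp hneg)
            (prefix_drop_infix s sym (by omega) hp)
        rw [hnil]
        simp [findLoopA]
      · -- a match at m = k + find(s.drop k, sym)
        have hge : 0 ≤ PySem.Chars.find (s.drop k) sym := by
          have := PySem.Chars.neg_one_le_find (s.drop k) sym
          omega
        obtain ⟨hpre, hmin⟩ := PySem.Chars.find_spec (s := s.drop k) (sub := sym) hge
        have hle : PySem.Chars.find (s.drop k) sym ≤ ((s.drop k).length : Int) :=
          PySem.Chars.find_le_length _ _
        set f : Nat := (PySem.Chars.find (s.drop k) sym).toNat with hfdef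
        have hfi : PySem.Chars.find (s.drop k) sym = (f : Int) := by omega
        have hflen : f ≤ s.length - k := by
          simp [List.length_drop] at hle; omega
        set m : Nat := k + f with hmdef
        have hmle : m ≤ s.length := by omega
        have hcast : (k : Int) + PySem.Chars.find (s.drop k) sym = (m : Int) := by
          rw [hfi]; omega
        simp only [if_neg hneg, hcast]
        have hm1 : ((m : Int)) ≠ -1 := by omega
        rw [findLoopA, if_pos hm1]
        have hstep : (m : Int) + 1 = ((m + 1 : Nat) : Int) := by push_cast; ring
        rw [hstep, ih (m + 1) (by omega) (by omega)]
        -- now massage the RHS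
        have hsplit : List.range' k (s.length + 1 - k)
            = List.range' k f ++ m :: List.range' (m + 1) (s.length + 1 - (m + 1)) := by
          have h1 : List.range' k f 1 ++ List.range' (k + 1 * f) (s.length + 1 - m) 1
              = List.range' k (f + (s.length + 1 - m)) 1 := List.range'_append
          rw [one_mul] at h1
          rw [show s.length + 1 - k = f + (s.length + 1 - m) by omega, ← h1]
          congr 1
          rw [show s.length + 1 - m = (s.length + 1 - (m + 1)) + 1 by omega, List.range'_succ]
        rw [hsplit]
        have hnil : (List.range' k f).filter
            (fun i => PySem.Chars.startswith (s.drop i) sym) = [] := by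
          rw [List.filter_eq_nil_iff]
          intro i hi
          rw [List.mem_range'_1] at hi
          simp only [Bool.eq_false_iff, PySem.Chars.startswith_iff]
          intro hp
          have hdd : List.drop i s = List.drop (i - k) (List.drop k s) := by
            rw [List.drop_drop]; congr 1; omega
          rw [hdd] at hp
          exact hmin (i - k) (by omega) hp
        have hmtrue : PySem.Chars.startswith (s.drop m) sym = true := by
          rw [PySem.Chars.startswith_iff]
          have hdd : (s.drop k).drop f = s.drop m := by
            rw [List.drop_drop]; try congr 1
            try omega
          rwa [hdd] at hpre
        rw [List.filter_append, hnil, List.filter_cons, if_pos (by simp [hmtrue])]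
        simp

-- ===== VERDICT (by name: the statement is the Claim_ definition above) =====
theorem find_pos1_spec : Claim_equal_find_pos1 := by
  intro string symbol _
  unfold Spec_find_pos1
  simp only [find_pos1, find_pos1_alt]
  set s := string.toList
  set sym := symbol.toList
  have h0 : PySem.Chars.find s sym = PySem.Chars.findFrom s sym ((0 : Nat) : Int) none := by
    norm_num [PySem.Chars.findFrom_zero]
  rw [h0, loop_main s sym (s.length + 2) 0 (by omega) (by omega),
      PySem.List.slice_zero_start, PySem.List.slice_to_neg_one, List.dropLast_concat,
      PySem.List.pyRange_one, List.filter_map]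
  have hlen : ((s.length : Int) + 1 - 0).toNat = s.length + 1 := by omega
  rw [hlen, List.range_eq_range']
  simp only [Nat.sub_zero]
  symm
  have hq : ∀ n ∈ List.range' 0 (s.length + 1),
      ((fun i => PySem.Chars.startswith (List.drop i.toNat s) sym) ∘ fun k => (0 : Int) + ↑k) n
        = (fun i => PySem.Chars.startswith (List.drop i s) sym) n := by
    intro n _
    simp [Function.comp]
  rw [List.filter_congr hq]
  apply List.map_congr_left
  intro a _
  simp
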